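-- pv_equiv track=rewrite | github.com/collinsakenga/codewars_solutions | 6 kyu/Frog jumping.py | solution
-- ===== SOURCE A (Python) =====
-- def solution(arr):
--     index=0
--     count=0
--     check=set()
--     while index not in check:
--         check.add(index)
--         index+=arr[index]
--         count+=1
--         if index<0 or index>=len(arr):
--             return count
--     return -1
-- ===== SOURCE B (Python) =====
-- def solution(arr):
--     n = len(arr)
--     i = 0
--     for k in range(n):
--         i += arr[i]
--         if i < 0 or i >= n:
--             return k + 1
--     return -1
-- ===== Notes on version B (the rewrite author's own statement) =====
-- stated objective: simpler
-- what changed: Replaced the visited-set cycle detection with a plain for-loop over range(n) (pigeonhole: an escaping path makes at most n jumps), removing the set and the membership test entirely.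
import Mathlib
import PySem

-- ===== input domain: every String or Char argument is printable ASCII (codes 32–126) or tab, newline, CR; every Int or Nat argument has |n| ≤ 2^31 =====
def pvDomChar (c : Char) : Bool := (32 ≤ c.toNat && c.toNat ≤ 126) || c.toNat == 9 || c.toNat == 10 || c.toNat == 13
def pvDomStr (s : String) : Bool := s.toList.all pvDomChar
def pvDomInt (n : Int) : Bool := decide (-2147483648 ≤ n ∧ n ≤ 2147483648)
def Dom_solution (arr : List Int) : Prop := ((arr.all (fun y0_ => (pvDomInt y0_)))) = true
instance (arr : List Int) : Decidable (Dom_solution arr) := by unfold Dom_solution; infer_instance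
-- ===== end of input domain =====

-- B drops A's visited set: a for-loop over range(n) suffices by pigeonhole; return values are proved equal on nonempty lists.

-- ===== PORT A =====
-- A's while loop with the visited set `check`; the fuel argument is a pure
-- totality guard (arr.length + 1 is proved sufficient below: each iteration
-- adds a fresh in-bounds index to `check`, so there are at most n iterations).
def solutionLoopA (arr : List Int) : Nat → List Int → Int → Int → Int
  | 0, _, _, _ => -1
  | fuel + 1, check, index, count =>
    if index ∈ check then -1
    else
      let index' := index + (PySem.List.pyGet? arr index).getD 0
      let count' := count + 1
      if index' < 0 ∨ (arr.length : Int) ≤ index' then count'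
      else solutionLoopA arr fuel (check ++ [index]) index' count'

def solution (arr : List Int) : Int :=
  solutionLoopA arr (arr.length + 1) [] 0 0

-- ===== PORT B =====
-- B's `for k in range(n)` body as a fold step: `.inl i` = still jumping from
-- index i, `.inr c` = already returned c (Python's early `return k + 1`).
def solutionStepB (arr : List Int) (st : Sum Int Int) (k : Int) : Sum Int Int :=
  match st with
  | .inr c => .inr c
  | .inl i =>
    let i' := i + (PySem.List.pyGet? arr i).getD 0
    if i' < 0 ∨ (arr.length : Int) ≤ i' then .inr (k + 1) else .inl i'

def solution_alt (arr : List Int) : Int :=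
  match (PySem.List.pyRange 0 arr.length 1).foldl (solutionStepB arr) (Sum.inl 0) with
  | .inl _ => -1
  | .inr c => c

-- ===== PRECONDITION & SPEC =====
-- Pre_ excludes only the empty list, on which Python A raises IndexError at its first subscript.
def Pre_solution (arr : List Int) : Prop := arr ≠ []
instance (arr : List Int) : Decidable (Pre_solution arr) := by unfold Pre_solution; infer_instance
def pvWitness_solution : List Int := [1, -1, 0]

def Spec_solution (arr : List Int) (out : Int) : Prop := out = solution_alt arr
instance (arr : List Int) (out : Int) : Decidable (Spec_solution arr out) := by unfold Spec_solution; infer_instance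

-- ===== CLAIM (what is proved, stated in full; the proofs are below) =====
def Claim_equal_solution : Prop := ∀ (arr : List Int), Dom_solution arr → Pre_solution arr → Spec_solution arr (solution arr)

-- ===== LEMMAS AND PROOFS =====

-- proof-side recursion describing what B's fold computes (fuel = iterations left, count = next return value)
def loopB (arr : List Int) : Nat → Int → Int → Int
  | 0, _, _ => -1
  | fuel + 1, index, count =>
    let index' := index + (PySem.List.pyGet? arr index).getD 0
    if index' < 0 ∨ (arr.length : Int) ≤ index' then count
    else loopB arr fuel index' (count + 1)

-- the jump function
def solStep (arr : List Int) (i : Int) : Int := i + (PySem.List.pyGet? arr i).getD 0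

def solInB (arr : List Int) (i : Int) : Prop := 0 ≤ i ∧ i < (arr.length : Int)

-- A's loop invariant: the current index is in bounds and each visited index
-- is in bounds with its successor either visited or equal to the current index.
def solInv (arr : List Int) (check : List Int) (index : Int) : Prop :=
  solInB arr index ∧ ∀ x ∈ check, solInB arr x ∧ (solStep arr x ∈ check ∨ solStep arr x = index)

-- once the state is `.inr c`, the fold is constant
theorem foldB_inr (arr : List Int) (L : List Int) (c : Int) :
    L.foldl (solutionStepB arr) (Sum.inr c) = Sum.inr c := by
  induction L with
  | nil => rfl
  | cons x xs ih => simpa [solutionStepB] using ih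

-- the fold over [k, k+1, …, k+f-1] starting at live index i is loopB f i (k+1)
theorem foldB_eq_loopB (arr : List Int) :
    ∀ (f : Nat) (k i : Int),
      (match (PySem.List.pyRange k (k + f) 1).foldl (solutionStepB arr) (Sum.inl i) with
       | .inl _ => -1
       | .inr c => c) = loopB arr f i (k + 1) := by
  intro f
  induction f with
  | zero =>
    intro k i
    rw [PySem.List.pyRange_one_eq_nil (by omega)]
    rfl
  | succ f ih =>
    intro k i
    rw [PySem.List.pyRange_one_cons (by push_cast; omega)]
    simp only [List.foldl_cons]
    by_cases hesc : i + (PySem.List.pyGet? arr i).getD 0 < 0 ∨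
        (arr.length : Int) ≤ i + (PySem.List.pyGet? arr i).getD 0
    · simp only [solutionStepB, if_pos hesc, foldB_inr, loopB, if_pos hesc]
    · simp only [solutionStepB, if_neg hesc, loopB, if_neg hesc]
      have : k + 1 + (f : Int) = k + ((f : Nat) + 1 : Nat) := by push_cast; ring
      rw [← this, ih (k + 1) _]

-- if the current index lies in a step-closed set of in-bounds indices, B never escapes
theorem loopB_closed (arr : List Int) (S : List Int)
    (hS : ∀ x ∈ S, solInB arr x ∧ solStep arr x ∈ S) :
    ∀ (fuel : Nat) (index count : Int), index ∈ S →
      loopB arr fuel index count = -1 := by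
  intro fuel
  induction fuel with
  | zero => intro index count _; rfl
  | succ f ih =>
    intro index count hmem
    obtain ⟨hib, hstep⟩ := hS index hmem
    obtain ⟨hib', _⟩ := hS _ hstep
    simp only [loopB]
    rw [if_neg (by
      simp only [solStep] at hib'
      push_neg
      exact ⟨hib'.1, hib'.2⟩)]
    exact ih _ _ hstep

theorem solution_main (arr : List Int) :
    ∀ (f : Nat) (check : List Int) (index count : Int),
      solInv arr check index → check.Nodup → (arr.length : Int) ≤ (f : Int) + check.length →
      solutionLoopA arr (f + 1) check index count = loopB arr f index (count + 1) := by
  intro f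
  induction f with
  | zero =>
    intro check index count hinv hnd hlen
    -- pigeonhole: check holds ≥ n distinct in-bounds ints, so index ∈ check
    obtain ⟨hib, hall⟩ := hinv
    have hsub : check.toFinset ⊆ Finset.Ico (0 : Int) (arr.length : Int) := by
      intro x hx
      rcases (hall x (List.mem_toFinset.mp hx)).1 with ⟨h1, h2⟩
      exact Finset.mem_Ico.mpr ⟨h1, h2⟩
    have hcard : (Finset.Ico (0 : Int) (arr.length : Int)).card ≤ check.toFinset.card := by
      rw [Int.card_Ico, List.toFinset_card_of_nodup hnd]
      simp only [CharP.cast_eq_zero] at hlen ⊢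
      omega
    have heq : check.toFinset = Finset.Ico (0 : Int) (arr.length : Int) :=
      Finset.eq_of_subset_of_card_le hsub hcard
    have hidx : index ∈ check := by
      have : index ∈ check.toFinset := by
        rw [heq]; exact Finset.mem_Ico.mpr ⟨hib.1, hib.2⟩
      exact List.mem_toFinset.mp this
    simp only [solutionLoopA, loopB]
    rw [if_pos hidx]
  | succ f ih =>
    intro check index count hinv hnd hlen
    obtain ⟨hib, hall⟩ := hinv
    by_cases hmem : index ∈ check
    · -- A reports a cycle; B runs out its fuel inside the closed set `check`
      have hclosed : ∀ x ∈ check, solInB arr x ∧ solStep arr x ∈ check := by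
        intro x hx
        obtain ⟨h1, h2⟩ := hall x hx
        refine ⟨h1, ?_⟩
        rcases h2 with h | h
        · exact h
        · rw [h]; exact hmem
      simp only [solutionLoopA]
      rw [if_pos hmem]
      exact (loopB_closed arr check hclosed (f + 1) index (count + 1) hmem).symm
    · simp only [solutionLoopA, loopB]
      rw [if_neg hmem]
      by_cases hesc : index + (PySem.List.pyGet? arr index).getD 0 < 0 ∨
          (arr.length : Int) ≤ index + (PySem.List.pyGet? arr index).getD 0
      · rw [if_pos hesc, if_pos hesc]
      · rw [if_neg hesc, if_neg hesc]
        push_neg at hesc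
        have hinv' : solInv arr (check ++ [index]) (index + (PySem.List.pyGet? arr index).getD 0) := by
          refine ⟨⟨hesc.1, hesc.2⟩, ?_⟩
          intro x hx
          rcases List.mem_append.mp hx with hx | hx
          · obtain ⟨h1, h2⟩ := hall x hx
            refine ⟨h1, ?_⟩
            rcases h2 with h | h
            · exact Or.inl (List.mem_append.mpr (Or.inl h))
            · exact Or.inl (List.mem_append.mpr (Or.inr (by simp [h])))
          · rcases List.mem_singleton.mp hx with rfl
            exact ⟨hib, Or.inr rfl⟩
        have hnd' : (check ++ [index]).Nodup := by
          refine List.Nodup.append hnd (List.nodup_singleton _) ?_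
          intro a ha hb
          simp only [List.mem_singleton] at hb
          exact hmem (hb ▸ ha)
        have hlen' : (arr.length : Int) ≤ (f : Int) + (check ++ [index]).length := by
          simp only [List.length_append, List.length_singleton]
          push_cast
          push_cast at hlen
          omega
        exact ih (check ++ [index]) _ (count + 1) hinv' hnd' hlen'

theorem solution_spec : Claim_equal_solution := by
  intro arr _ hpre
  have hn : 0 < arr.length := List.length_pos_iff.mpr hpre
  unfold Spec_solution solution solution_alt
  have hb := foldB_eq_loopB arr arr.length 0 0
  rw [show (0 : Int) + (arr.length : Nat) = (arr.length : Int) by push_cast; ring] at hb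
  rw [hb]
  have := solution_main arr arr.length [] 0 0
    ⟨⟨le_refl 0, by exact_mod_cast hn⟩, by simp⟩ List.nodup_nil (by simp)
  simpa using this
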